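-- pv_equiv track=rewrite | github.com/EleutherAI/lm-scope | scripts/utils.py | divide_optimally
-- ===== SOURCE A (Python) =====
-- def partition(n, parts):
--     return [n // parts + (1 if i < n % parts else 0) for i in range(parts)]
--
-- def prefix_sums(v):
--     s = 0
--     ret = []
--     for e in v:
--         ret.append(s)
--         s += e
--     return ret
--
-- def divide_optimally(v, parts):
--     sizes = partition(len(v), parts)
--     offsets = prefix_sums(sizes)
--     buckets = []
--     for size, offset in zip(sizes, offsets):
--         s = v[offset:offset+size]
--         buckets.append(s)
--     return buckets
-- ===== SOURCE B (Python) =====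
-- def divide_optimally(v, parts):
--     if parts <= 0:
--         return []
--     n = len(v)
--     q, r = divmod(n, parts)
--     bound = lambda i: i * q + min(i, r)
--     return [v[bound(i):bound(i + 1)] for i in range(parts)]
-- ===== Notes on version B (the rewrite author's own statement) =====
-- stated objective: simpler
-- what changed: Replaces A's sizes table, prefix-sums pass and zip loop with a single comprehension that slices at closed-form bucket boundaries b(i) = i*(n//parts) + min(i, n%parts).
import Mathlib
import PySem

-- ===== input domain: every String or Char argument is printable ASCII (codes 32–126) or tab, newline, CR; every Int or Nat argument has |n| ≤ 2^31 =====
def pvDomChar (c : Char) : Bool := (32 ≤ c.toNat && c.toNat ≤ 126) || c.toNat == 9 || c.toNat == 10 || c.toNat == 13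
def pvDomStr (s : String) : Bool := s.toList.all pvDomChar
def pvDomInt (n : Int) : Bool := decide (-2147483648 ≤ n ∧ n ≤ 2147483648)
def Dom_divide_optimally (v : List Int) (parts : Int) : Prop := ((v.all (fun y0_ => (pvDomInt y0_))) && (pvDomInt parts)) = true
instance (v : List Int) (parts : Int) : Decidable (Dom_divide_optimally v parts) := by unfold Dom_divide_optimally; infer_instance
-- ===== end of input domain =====

-- B replaces A's sizes table + prefix-sums pass + zip loop by a closed-form bucket
-- boundary b(i) = i*q + min(i,r) and a single comprehension over range(parts) (objective: simpler).

-- ===== PORT A =====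
def pvPartition (n parts : Int) : List Int :=
  (PySem.List.pyRange 0 parts 1).map
    (fun i => PySem.Int.floordiv n parts + if i < PySem.Int.mod n parts then 1 else 0)

def pvPrefixSums (v : List Int) : List Int :=
  (v.foldl (fun (st : Int × List Int) e => (st.1 + e, st.2 ++ [st.1])) (0, [])).2

def divide_optimally (v : List Int) (parts : Int) : List (List Int) :=
  let sizes := pvPartition (v.length : Int) parts
  let offsets := pvPrefixSums sizes
  (sizes.zip offsets).foldl
    (fun buckets so => buckets ++ [PySem.List.slice v (some so.2) (some (so.2 + so.1))]) []

-- ===== PORT B =====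
def divide_optimally_alt (v : List Int) (parts : Int) : List (List Int) :=
  if parts ≤ 0 then []
  else
    let n : Int := (v.length : Int)
    let q := PySem.Int.floordiv n parts
    let r := PySem.Int.mod n parts
    let bound := fun (i : Int) => i * q + min i r
    (PySem.List.pyRange 0 parts 1).map
      (fun i => PySem.List.slice v (some (bound i)) (some (bound (i + 1))))

-- ===== PRECONDITION & SPEC =====
def Spec_divide_optimally (v : List Int) (parts : Int) (out : List (List Int)) : Prop := out = divide_optimally_alt v parts
instance (v : List Int) (parts : Int) (out : List (List Int)) : Decidable (Spec_divide_optimally v parts out) := by unfold Spec_divide_optimally; infer_instance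

-- ===== CLAIM (what is proved, stated in full; the proofs are below) =====
def Claim_equal_divide_optimally : Prop := ∀ (v : List Int) (parts : Int), Dom_divide_optimally v parts → Spec_divide_optimally v parts (divide_optimally v parts)

-- ===== LEMMAS AND PROOFS =====

-- A's prefix-sums loop, run over the f-values of a range, produces the bound-values of
-- that range, whenever bound is the running sum of f (bnd i + f i = bnd (i+1)).
lemma prefix_foldl (f bnd : Int → Int) (hstep : ∀ i, bnd i + f i = bnd (i + 1)) :
    ∀ (k : Nat) (a b : Int), (b - a).toNat = k → ∀ (acc : List Int),
    (((PySem.List.pyRange a b 1).map f).foldl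
        (fun (st : Int × List Int) e => (st.1 + e, st.2 ++ [st.1])) (bnd a, acc)).2
      = acc ++ (PySem.List.pyRange a b 1).map bnd := by
  intro k
  induction k with
  | zero =>
    intro a b h acc
    rw [PySem.List.pyRange_one_eq_nil (by omega)]
    simp
  | succ k ih =>
    intro a b h acc
    rw [PySem.List.pyRange_one_cons (by omega)]
    simp only [List.map_cons, List.foldl_cons, hstep a]
    rw [ih (a + 1) b (by omega) (acc ++ [bnd a])]
    simp

-- ===== VERDICT (by name: the statement is the Claim_ definition above) =====
theorem divide_optimally_spec : Claim_equal_divide_optimally := by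
  unfold Claim_equal_divide_optimally Spec_divide_optimally
  intro v parts _
  unfold divide_optimally divide_optimally_alt pvPartition pvPrefixSums
  by_cases hp : parts ≤ 0
  · simp [hp, PySem.List.pyRange_one_eq_nil (by omega : parts ≤ 0)]
  · simp only [if_neg hp]
    push Not at hp
    set n : Int := (v.length : Int) with hn
    set q := PySem.Int.floordiv n parts with hq
    set r := PySem.Int.mod n parts with hr
    have hr0 : 0 ≤ r := PySem.Int.mod_nonneg n hp
    set f : Int → Int := fun i => q + if i < r then 1 else 0 with hf
    set bnd : Int → Int := fun i => i * q + min i r with hbnd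
    have hstep : ∀ i, bnd i + f i = bnd (i + 1) := by
      intro i
      simp only [hf, hbnd]
      by_cases h : i < r
      · have h1 : min i r = i := by omega
        have h2 : min (i + 1) r = i + 1 := by omega
        rw [if_pos h, h1, h2]; ring
      · have h1 : min i r = r := by omega
        have h2 : min (i + 1) r = r := by omega
        rw [if_neg h, h1, h2]; ring
    have hb0 : bnd 0 = 0 := by simp [hbnd]; omega
    have hoff := prefix_foldl f bnd hstep (parts - 0).toNat 0 parts (by omega) []
    rw [hb0] at hoff
    rw [hoff]
    simp only [List.nil_append]
    rw [List.zip_map' (l := PySem.List.pyRange 0 parts 1) (f := f) (g := bnd)]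
    rw [PySem.List.foldl_append_singleton_eq_map]
    simp only [List.map_map, List.nil_append]
    apply List.map_congr_left
    intro i _
    have h := hstep i
    simp only [hbnd] at h
    simp only [Function.comp]
    rw [h]
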